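-- pv_equiv track=rewrite | github.com/simonex3/unraid-dashboard | speedtest_server.py | pick_main_iface
-- ===== SOURCE A (Python) =====
-- _NET_PREFER = ["bond0", "eth0", "eth1", "ens3", "ens0", "enp3s0", "enp0s3"]
--
-- _NET_IGNORE = {"lo", "tunl0", "virbr0", "docker0", "tailscale1"}
--
-- _NET_IGNORE_PFX = ("veth", "br-", "vnet", "tun", "tap")
--
-- def pick_main_iface(stats):
--     """Return the name of the primary network interface."""
--     for pref in _NET_PREFER:
--         if pref in stats:
--             return pref
--     candidates = [
--         (k, v["rxBytes"] + v["txBytes"])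
--         for k, v in stats.items()
--         if k not in _NET_IGNORE and not k.startswith(_NET_IGNORE_PFX)
--     ]
--     candidates.sort(key=lambda x: x[1], reverse=True)
--     return candidates[0][0] if candidates else None
-- ===== SOURCE B (Python) =====
-- _NET_PREFER = ["bond0", "eth0", "eth1", "ens3", "ens0", "enp3s0", "enp0s3"]
--
-- _NET_IGNORE = {"lo", "tunl0", "virbr0", "docker0", "tailscale1"}
--
-- _NET_IGNORE_PFX = ("veth", "br-", "vnet", "tun", "tap")
--
-- def pick_main_iface(stats):
--     """Return the name of the primary network interface."""
--     for pref in _NET_PREFER: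
--         if pref in stats:
--             return pref
--     best = None  # (name, total) of the best candidate seen so far
--     for k, v in stats.items():
--         if k in _NET_IGNORE or k.startswith(_NET_IGNORE_PFX):
--             continue
--         t = v["rxBytes"] + v["txBytes"]
--         if best is None or t > best[1]:
--             best = (k, t)
--     return best[0] if best is not None else None
-- ===== Notes on version B (the rewrite author's own statement) =====
-- stated objective: simpler
-- what changed: The build-a-candidate-list, stable-descending-sort, take-head fallback is replaced by a single pass over stats.items() that tracks the running maximum of rxBytes+txBytes with strict '>', so the first interface of maximal traffic wins, matching the stable sort's tie-break.
import Mathlib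
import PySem

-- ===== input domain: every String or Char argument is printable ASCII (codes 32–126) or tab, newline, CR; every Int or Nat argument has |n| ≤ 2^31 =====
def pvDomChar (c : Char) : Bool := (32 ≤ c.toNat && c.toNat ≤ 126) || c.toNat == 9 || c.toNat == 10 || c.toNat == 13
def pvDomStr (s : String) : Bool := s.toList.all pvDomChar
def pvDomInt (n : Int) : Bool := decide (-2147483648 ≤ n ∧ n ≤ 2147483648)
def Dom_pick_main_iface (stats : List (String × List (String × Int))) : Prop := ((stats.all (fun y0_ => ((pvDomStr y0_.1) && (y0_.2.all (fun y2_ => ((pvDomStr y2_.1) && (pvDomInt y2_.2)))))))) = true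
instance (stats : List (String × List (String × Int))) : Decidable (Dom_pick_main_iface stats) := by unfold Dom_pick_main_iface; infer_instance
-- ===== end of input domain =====

-- B replaces A's candidate-list + stable descending sort + head with a single pass that keeps
-- the first interface of maximal rxBytes+txBytes (strict '>'), which is simpler and matches
-- the stable sort's tie-break. Equivalence is about the return value only.

-- shared module-level constants of the Python module
def pvNetPrefer : List String := ["bond0", "eth0", "eth1", "ens3", "ens0", "enp3s0", "enp0s3"]
def pvNetIgnore : List String := ["lo", "tunl0", "virbr0", "docker0", "tailscale1"]
def pvNetIgnorePfx : List String := ["veth", "br-", "vnet", "tun", "tap"]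

-- k in _NET_IGNORE or k.startswith(_NET_IGNORE_PFX)
def pvIgnored (k : String) : Bool :=
  pvNetIgnore.contains k || pvNetIgnorePfx.any (fun p => PySem.Str.startswith k p)

-- v["rxBytes"] + v["txBytes"]; getD 0 is exact on Pre_, which guarantees both keys are present
def pvTotal (v : List (String × Int)) : Int :=
  (PySem.Dict.ofList v).getD "rxBytes" 0 + (PySem.Dict.ofList v).getD "txBytes" 0

-- ===== PORT A =====
-- the 'for pref in _NET_PREFER: if pref in stats: return pref' loop, as structural recursion
def pvPreferLoop : List String → PySem.Dict String (List (String × Int)) → Option String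
  | [], _ => none
  | p :: ps, d => if d.contains p then some p else pvPreferLoop ps d

def pick_main_iface (stats : List (String × List (String × Int))) : Option String :=
  match pvPreferLoop pvNetPrefer (PySem.Dict.ofList stats) with
  | some p => some p
  | none =>
    -- the list comprehension over stats.items() with its filter, then
    -- candidates.sort(key=lambda x: x[1], reverse=True); candidates[0][0] if candidates else None
    match PySem.List.sorted
        ((PySem.Dict.ofList stats).items.filterMap
          (fun kv => if pvIgnored kv.1 then none else some (kv.1, pvTotal kv.2)))
        (fun x => x.2) true with
    | c :: _ => some c.1
    | [] => none

-- ===== PORT B =====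
def pick_main_iface_alt (stats : List (String × List (String × Int))) : Option String :=
  match pvNetPrefer.find? (fun p => (PySem.Dict.ofList stats).contains p) with
  | some p => some p
  | none =>
    ((PySem.Dict.ofList stats).items.foldl
      (fun acc kv =>
        if pvIgnored kv.1 then acc
        else
          let t := pvTotal kv.2
          match acc with
          | none => some (kv.1, t)
          | some b => if b.2 < t then some (kv.1, t) else some b)
      none).map (fun b => b.1)

-- ===== PRECONDITION & SPEC =====
-- Pre_ excludes exactly the inputs where Python A raises KeyError: when no preferred name is a
-- key, every non-ignored interface's dict must contain both "rxBytes" and "txBytes".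
def Pre_pick_main_iface (stats : List (String × List (String × Int))) : Prop :=
  (∀ p ∈ pvNetPrefer, (PySem.Dict.ofList stats).contains p = false) →
    ∀ kv ∈ (PySem.Dict.ofList stats).items, pvIgnored kv.1 = false →
      (PySem.Dict.ofList kv.2).contains "rxBytes" = true ∧
      (PySem.Dict.ofList kv.2).contains "txBytes" = true
instance (stats : List (String × List (String × Int))) : Decidable (Pre_pick_main_iface stats) := by
  unfold Pre_pick_main_iface; infer_instance

def pvWitness_pick_main_iface : (List (String × List (String × Int))) :=
  [("eth0", []), ("wlan0", [("rxBytes", 5), ("txBytes", 7)])]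

def Spec_pick_main_iface (stats : List (String × List (String × Int))) (out : Option String) : Prop := out = pick_main_iface_alt stats
instance (stats : List (String × List (String × Int))) (out : Option String) : Decidable (Spec_pick_main_iface stats out) := by unfold Spec_pick_main_iface; infer_instance

-- ===== CLAIM (what is proved, stated in full; the proofs are below) =====
def Claim_equal_pick_main_iface : Prop := ∀ (stats : List (String × List (String × Int))), Dom_pick_main_iface stats → Pre_pick_main_iface stats → Spec_pick_main_iface stats (pick_main_iface stats)

-- ===== LEMMAS AND PROOFS =====

-- the step B performs on a surviving candidate (name, total)
def pvStep (acc : Option (String × Int)) (c : String × Int) : Option (String × Int) :=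
  match acc with
  | none => some c
  | some b => if b.2 < c.2 then some c else some b

theorem pvPreferLoop_eq_find? (ps : List String) (d : PySem.Dict String (List (String × Int))) :
    pvPreferLoop ps d = ps.find? (fun p => d.contains p) := by
  induction ps with
  | nil => rfl
  | cons p ps ih =>
    simp only [pvPreferLoop, List.find?_cons]
    by_cases h : d.contains p = true
    · simp [h]
    · simp only [Bool.not_eq_true] at h; simp [h, ih]

theorem pvHead_insertBy (x : String × Int) (acc : List (String × Int)) :
    (PySem.List.insertBy (fun a b => decide ((fun y : String × Int => y.2) b < (fun y : String × Int => y.2) a)) x acc).head?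
      = pvStep acc.head? x := by
  cases acc with
  | nil => rfl
  | cons h t =>
    simp only [PySem.List.insertBy, pvStep, List.head?_cons]
    by_cases hlt : h.2 < x.2
    · simp [hlt]
    · simp [hlt]

theorem pvHead_foldl_insertBy (cs : List (String × Int)) (acc : List (String × Int)) :
    (cs.foldl (fun a x => PySem.List.insertBy (fun a b => decide ((fun y : String × Int => y.2) b < (fun y : String × Int => y.2) a)) x a) acc).head?
      = cs.foldl pvStep acc.head? := by
  induction cs generalizing acc with
  | nil => rfl
  | cons c cs ih =>
    simp only [List.foldl_cons]
    rw [ih, pvHead_insertBy]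

-- B's fold over all items equals the simple max-step fold over the filtered candidates
theorem pvFoldl_filterMap (items : List (String × List (String × Int)))
    (acc : Option (String × Int)) :
    items.foldl
      (fun acc kv =>
        if pvIgnored kv.1 then acc
        else
          let t := pvTotal kv.2
          match acc with
          | none => some (kv.1, t)
          | some b => if b.2 < t then some (kv.1, t) else some b)
      acc
    = (items.filterMap (fun kv => if pvIgnored kv.1 then none else some (kv.1, pvTotal kv.2))).foldl pvStep acc := by
  induction items generalizing acc with
  | nil => rfl
  | cons kv items ih =>
    simp only [List.foldl_cons, List.filterMap_cons]
    by_cases h : pvIgnored kv.1 = true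
    · simp [h, ih]
    · simp only [Bool.not_eq_true] at h
      simp only [h, Bool.false_eq_true, if_false, List.foldl_cons]
      rw [ih]
      rfl

theorem pick_main_iface_eq (stats : List (String × List (String × Int))) :
    pick_main_iface stats = pick_main_iface_alt stats := by
  unfold pick_main_iface pick_main_iface_alt
  rw [pvPreferLoop_eq_find?]
  cases hf : pvNetPrefer.find? (fun p => (PySem.Dict.ofList stats).contains p) with
  | some p => rfl
  | none =>
    rw [pvFoldl_filterMap]
    rw [PySem.List.sorted_rev_eq_foldl_insertBy]
    set cs := (PySem.Dict.ofList stats).items.filterMap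
      (fun kv => if pvIgnored kv.1 then none else some (kv.1, pvTotal kv.2)) with hcs
    have h := pvHead_foldl_insertBy cs []
    simp only [List.head?_nil] at h
    cases hsort : cs.foldl (fun a x => PySem.List.insertBy (fun a b => decide ((fun y : String × Int => y.2) b < (fun y : String × Int => y.2) a)) x a) [] with
    | nil =>
      rw [hsort] at h
      simp only [List.head?_nil] at h
      rw [← h]
      rfl
    | cons c t =>
      rw [hsort] at h
      simp only [List.head?_cons] at h
      rw [← h]
      rfl

-- ===== VERDICT (by name: the statement is the Claim_ definition above) =====
theorem pick_main_iface_spec : Claim_equal_pick_main_iface := by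
  intro stats _ _
  unfold Spec_pick_main_iface
  exact pick_main_iface_eq stats
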